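-- pv_equiv track=rewrite | github.com/alxgmpr/lutron-tools | tools/grafik-eye-decrypt.py | iter_payload_bytes
-- ===== SOURCE A (Python) =====
-- def iter_payload_bytes(data, payload_start, edi_1):
--     """Yield ciphertext bytes from `payload_start` onward, skipping label bytes
--     (every offset where (pos & 0xf) == 0) until we run past edi_1, then
--     continuing without skipping."""
--     pos = payload_start
--     esi = 1 if payload_start > edi_1 else 0
--     while pos < len(data):
--         if esi == 0:
--             if (pos & 0xf) == 0:
--                 pos += 1
--                 if pos >= len(data):
--                     return
--             if pos > edi_1:
--                 esi = 1
--         yield data[pos]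
--         pos += 1
-- ===== SOURCE B (Python) =====
-- def iter_payload_bytes(data, payload_start, edi_1):
--     """Closed-form rewrite: instead of simulating A's skip/pass state machine,
--     compute `cut` -- the first position emitted in pass-through mode --
--     arithmetically, then select the yielded bytes with one comprehension
--     (before `cut` the 16-aligned label offsets are dropped, from `cut` on
--     everything is kept)."""
--     if payload_start > edi_1:
--         cut = payload_start
--     else:
--         cut = edi_1 + 1
--         if (cut & 0xf) == 0:
--             cut += 1
--     return (data[p] for p in range(payload_start, len(data))
--             if p >= cut or (p & 0xf) != 0)
-- ===== Notes on version B (the rewrite author's own statement) =====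
-- stated objective: alternative
-- what changed: Replaced A's skip/pass state machine (an esi flag mutated inside one while loop) by arithmetic: compute the first pass-through position `cut` in closed form, then select the yielded bytes with a single filtered comprehension over the index range.
import Mathlib
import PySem

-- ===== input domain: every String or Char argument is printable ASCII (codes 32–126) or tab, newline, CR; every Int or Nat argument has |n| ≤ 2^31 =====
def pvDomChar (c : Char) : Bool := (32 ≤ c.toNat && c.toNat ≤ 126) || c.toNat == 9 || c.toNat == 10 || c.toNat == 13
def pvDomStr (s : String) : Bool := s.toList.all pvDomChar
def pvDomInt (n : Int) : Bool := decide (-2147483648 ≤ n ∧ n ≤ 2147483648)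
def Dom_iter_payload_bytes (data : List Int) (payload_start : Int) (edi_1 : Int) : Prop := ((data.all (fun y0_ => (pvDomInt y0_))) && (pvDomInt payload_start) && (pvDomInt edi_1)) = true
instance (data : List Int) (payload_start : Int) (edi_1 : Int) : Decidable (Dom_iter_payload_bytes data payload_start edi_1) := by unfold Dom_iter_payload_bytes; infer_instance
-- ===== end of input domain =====

-- B replaces A's skip/pass state machine by a closed-form `cut` position plus one
-- filtered comprehension over the index range (objective: alternative algorithm,
-- same cost); return-value equivalence only (both sources are generators; the
-- ports collect the yielded values).

-- ===== PORT A =====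
-- A's while loop with state (esi, pos); data[pos] via pyGetD (in range on Pre_).
-- Fuel (len - pos).toNat bounds the iteration count (pos grows by ≥ 1 per step),
-- so the fuel-0 branch coincides with loop exit.
def iterA_loop (data : List Int) (edi_1 : Int) : Nat → Int → Int → List Int
  | 0, _, _ => []
  | fuel + 1, esi, pos =>
    if pos < (data.length : Int) then
      if esi == 0 then
        if PySem.Int.band pos 15 == 0 then
          if pos + 1 ≥ (data.length : Int) then []
          else
            let esi' := if pos + 1 > edi_1 then 1 else esi
            PySem.List.pyGetD data (pos + 1) 0 :: iterA_loop data edi_1 fuel esi' (pos + 2)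
        else
          let esi' := if pos > edi_1 then 1 else esi
          PySem.List.pyGetD data pos 0 :: iterA_loop data edi_1 fuel esi' (pos + 1)
      else
        PySem.List.pyGetD data pos 0 :: iterA_loop data edi_1 fuel esi (pos + 1)
    else []

def iter_payload_bytes (data : List Int) (payload_start : Int) (edi_1 : Int) : List Int :=
  iterA_loop data edi_1 ((data.length : Int) + 1 - payload_start).toNat
    (if payload_start > edi_1 then 1 else 0) payload_start

-- ===== PORT B =====
-- closed-form cut, then one filtered comprehension over range(payload_start, len(data)).
def iter_payload_bytes_alt (data : List Int) (payload_start : Int) (edi_1 : Int) : List Int :=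
  let cut : Int :=
    if payload_start > edi_1 then payload_start
    else if PySem.Int.band (edi_1 + 1) 15 == 0 then edi_1 + 2 else edi_1 + 1
  ((PySem.List.pyRange payload_start (data.length : Int) 1).filter
      (fun p => decide (cut ≤ p) || !(PySem.Int.band p 15 == 0))).map
    (fun p => PySem.List.pyGetD data p 0)

-- ===== PRECONDITION & SPEC =====
-- Pre_ excludes exactly the inputs where Python A raises IndexError: payload_start
-- below -len(data), except the corner -len-1 at a 16-aligned offset with
-- payload_start ≤ edi_1, where A's skip step rescues the access and A returns.
def Pre_iter_payload_bytes (data : List Int) (payload_start : Int) (edi_1 : Int) : Prop :=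
  -(data.length : Int) ≤ payload_start ∨
    (payload_start = -(data.length : Int) - 1 ∧ PySem.Int.band payload_start 15 = 0 ∧
      payload_start ≤ edi_1)
instance (data : List Int) (payload_start : Int) (edi_1 : Int) : Decidable (Pre_iter_payload_bytes data payload_start edi_1) := by unfold Pre_iter_payload_bytes; infer_instance

def pvWitness_iter_payload_bytes : List Int × Int × Int := ([10, 20, 30, 40, 50], 0, 2)

def Spec_iter_payload_bytes (data : List Int) (payload_start : Int) (edi_1 : Int) (out : List Int) : Prop := out = iter_payload_bytes_alt data payload_start edi_1
instance (data : List Int) (payload_start : Int) (edi_1 : Int) (out : List Int) : Decidable (Spec_iter_payload_bytes data payload_start edi_1 out) := by unfold Spec_iter_payload_bytes; infer_instance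

-- ===== CLAIM (what is proved, stated in full; the proofs are below) =====
def Claim_equal_iter_payload_bytes : Prop := ∀ (data : List Int) (payload_start : Int) (edi_1 : Int), Dom_iter_payload_bytes data payload_start edi_1 → Pre_iter_payload_bytes data payload_start edi_1 → Spec_iter_payload_bytes data payload_start edi_1 (iter_payload_bytes data payload_start edi_1)

-- ===== LEMMAS AND PROOFS =====

-- pos & 15 is pos mod 16 (Python's floor mod = Int.emod for positive divisor).
theorem band15_eq (x : Int) : PySem.Int.band x 15 = x % 16 := by
  have hand : ∀ m : Nat, m &&& 15 = m % 16 := fun m => by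
    have := Nat.and_two_pow_sub_one_eq_mod m 4
    norm_num at this; exact this
  have ht : Int.toNat 15 = 15 := rfl
  unfold PySem.Int.band
  by_cases hx : 0 ≤ x
  · simp only [if_pos hx, if_pos (by norm_num : (0:Int) ≤ 15), ht]
    rw [hand]; omega
  · simp only [if_neg hx, if_pos (by norm_num : (0:Int) ≤ 15), ht]
    rw [Nat.and_comm, hand]
    omega

-- A's pass-through phase (esi = 1) is B's comprehension once every position
-- from pos on satisfies the filter (cut ≤ pos).
theorem iterA_one_eq_filter (data : List Int) (edi_1 cut : Int) :
    ∀ (fuel : Nat) (pos : Int), ((data.length : Int) - pos).toNat ≤ fuel → cut ≤ pos →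
      iterA_loop data edi_1 fuel 1 pos =
        ((PySem.List.pyRange pos (data.length : Int) 1).filter
            (fun p => decide (cut ≤ p) || !(PySem.Int.band p 15 == 0))).map
          (fun p => PySem.List.pyGetD data p 0) := by
  intro fuel
  induction fuel with
  | zero =>
    intro pos h hc
    rw [PySem.List.pyRange_one_eq_nil (by omega)]
    rfl
  | succ f ih =>
    intro pos h hc
    by_cases hp : pos < (data.length : Int)
    · rw [PySem.List.pyRange_one_cons hp]
      simp only [iterA_loop, if_pos hp, List.filter_cons]
      rw [ih (pos + 1) (by omega) (by omega)]
      simp [hc]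
    · rw [PySem.List.pyRange_one_eq_nil (by omega)]
      simp [iterA_loop, hp]

-- A's skip phase (esi = 0, pos ≤ edi_1 + 1) is B's comprehension with
-- cut = the first non-16-aligned position past edi_1.
theorem iterA_zero_eq_filter (data : List Int) (edi_1 : Int) :
    ∀ (fuel : Nat) (pos : Int), ((data.length : Int) - pos).toNat ≤ fuel →
      pos ≤ edi_1 + 1 →
      iterA_loop data edi_1 fuel 0 pos =
        ((PySem.List.pyRange pos (data.length : Int) 1).filter
            (fun p => decide ((if PySem.Int.band (edi_1 + 1) 15 == 0 then edi_1 + 2 else edi_1 + 1) ≤ p)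
              || !(PySem.Int.band p 15 == 0))).map
          (fun p => PySem.List.pyGetD data p 0) := by
  intro fuel
  induction fuel with
  | zero =>
    intro pos h _
    rw [PySem.List.pyRange_one_eq_nil (by omega)]
    rfl
  | succ f ih =>
    intro pos h hle
    set cut : Int := if PySem.Int.band (edi_1 + 1) 15 == 0 then edi_1 + 2 else edi_1 + 1 with hcut
    have hcut_mod : (PySem.Int.band (edi_1 + 1) 15 == 0) = true → cut = edi_1 + 2 := by
      intro hb; rw [hcut, if_pos hb]
    have hcut_mod' : ¬ (PySem.Int.band (edi_1 + 1) 15 == 0) = true → cut = edi_1 + 1 := by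
      intro hb; rw [hcut, if_neg hb]
    by_cases hp : pos < (data.length : Int)
    · rw [PySem.List.pyRange_one_cons hp]
      simp only [iterA_loop, if_pos hp]
      by_cases hb : (PySem.Int.band pos 15 == 0) = true
      · -- aligned position: A skips it; the filter drops it (pos < cut)
        have hmod : pos % 16 = 0 := by
          have := band15_eq pos; simpa [this] using hb
        have hpos_lt_cut : ¬ cut ≤ pos := by
          by_cases hc : (PySem.Int.band (edi_1 + 1) 15 == 0) = true
          · rw [hcut_mod hc]; omega
          · have hcm : (edi_1 + 1) % 16 ≠ 0 := by
              have hb' := band15_eq (edi_1 + 1); rw [hb'] at hc; simpa using hc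
            rw [hcut_mod' hc]
            -- pos ≤ edi_1 + 1 and pos aligned; if pos = edi_1 + 1 then edi_1+1 aligned, contra
            omega
        simp only [List.filter_cons, hpos_lt_cut, hb]
        by_cases h1 : pos + 1 ≥ (data.length : Int)
        · rw [if_pos h1, PySem.List.pyRange_one_eq_nil (by omega)]
          simp
        · rw [if_neg h1, PySem.List.pyRange_one_cons (by omega)]
          have hnb : ¬ (PySem.Int.band (pos + 1) 15 == 0) = true := by
            have := band15_eq (pos + 1); simp [this]; omega
          by_cases he : pos + 1 > edi_1
          · -- A flips to pass-through; cut = pos + 1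
            have hcp : cut = pos + 1 := by
              by_cases hc : (PySem.Int.band (edi_1 + 1) 15 == 0) = true
              · have hcm : (edi_1 + 1) % 16 = 0 := by
                  have hb' := band15_eq (edi_1 + 1); rw [hb'] at hc; simpa using hc
                rw [hcut_mod hc]
                -- edi_1 + 1 aligned; pos aligned with pos ∈ {edi_1, edi_1+1} → pos = edi_1+1
                omega
              · have hcm : (edi_1 + 1) % 16 ≠ 0 := by
                  have hb' := band15_eq (edi_1 + 1); rw [hb'] at hc; simpa using hc
                rw [hcut_mod' hc]
                -- edi_1 + 1 not aligned; pos aligned with pos ∈ {edi_1, edi_1+1} → pos = edi_1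
                omega
            simp only [if_pos he, List.filter_cons]
            rw [iterA_one_eq_filter data edi_1 cut f (pos + 2) (by omega) (by omega),
              show pos + 2 = pos + 1 + 1 from by ring]
            simp [hcp]
          · -- still skipping: recurse
            simp only [if_neg he, List.filter_cons]
            rw [ih (pos + 2) (by omega) (by omega),
              show pos + 2 = pos + 1 + 1 from by ring]
            have : ¬ cut ≤ pos + 1 := by
              by_cases hc : (PySem.Int.band (edi_1 + 1) 15 == 0) = true
              · rw [hcut_mod hc]; omega
              · rw [hcut_mod' hc]; omega
            simp [this, hnb]
      · -- non-aligned position: A yields it; the filter keeps it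
        simp only [if_neg hb, List.filter_cons]
        by_cases he : pos > edi_1
        · -- pos = edi_1 + 1, not aligned → cut = pos; flip to pass-through
          have hq : pos = edi_1 + 1 := by omega
          have hcp : cut = pos := by
            rw [hcut_mod' (by rw [← hq]; exact hb), hq]
          simp only [if_pos he]
          rw [iterA_one_eq_filter data edi_1 cut f (pos + 1) (by omega) (by omega)]
          simp [hcp, hb]
        · simp only [if_neg he]
          rw [ih (pos + 1) (by omega) (by omega)]
          simp [hb]
    · rw [PySem.List.pyRange_one_eq_nil (by omega)]
      simp [iterA_loop, hp]

-- ===== VERDICT (by name: the statement is the Claim_ definition above) =====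
theorem iter_payload_bytes_spec : Claim_equal_iter_payload_bytes := by
  intro data payload_start edi_1 _ _
  unfold Spec_iter_payload_bytes iter_payload_bytes iter_payload_bytes_alt
  by_cases h : payload_start > edi_1
  · simp only [if_pos h]
    exact iterA_one_eq_filter data edi_1 payload_start _ payload_start (by omega) le_rfl
  · simp only [if_neg h]
    exact iterA_zero_eq_filter data edi_1 _ payload_start (by omega) (by omega)
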